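-- pv_equiv track=rewrite | github.com/lun-ai/sequential-teaching | data/analysis/eval_trace.py | vectorise_trace_seq
-- ===== SOURCE A (Python) =====
-- def vectorise_trace_seq(machine_trace, human_trace, labels):
--     vm = {}
--     vh = {}
--     for l1 in labels:
--         for l2 in labels:
--             # a new comparison pair
--             if l1 != l2 and not (str(l1 + ',' + l2) in vm or str(l1 + ',' + l2) in vh) and not (
--                     str(l2 + ',' + l1) in vm or str(l2 + ',' + l1) in vh):
--                 vm[l1 + ',' + l2] = 0
--                 vh[l1 + ',' + l2] = 0
--                 if [l1, l2] in machine_trace or [l2, l1] in machine_trace: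
--                     if [l1, l2] in machine_trace:
--                         vm[l1 + ',' + l2] = machine_trace.index([l1, l2]) + 1
--                     elif [l2, l1] in machine_trace:
--                         vm[l1 + ',' + l2] = machine_trace.index([l2, l1]) + 1
--                 if [l1, l2] in human_trace or [l2, l1] in human_trace:
--                     if [l1, l2] in human_trace:
--                         vh[l1 + ',' + l2] = human_trace.index([l1, l2]) + 1
--                     elif [l2, l1] in human_trace:
--                         vh[l1 + ',' + l2] = human_trace.index([l2, l1]) + 1
--     return vm, vh
-- ===== SOURCE B (Python) =====
-- def _index_map(trace):
--     # earliest-wins map: 2-element step -> its 1-based position in the trace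
--     idx = {}
--     for i, step in enumerate(trace):
--         if len(step) == 2 and (step[0], step[1]) not in idx:
--             idx[(step[0], step[1])] = i + 1
--     return idx
--
--
-- def vectorise_trace_seq(machine_trace, human_trace, labels):
--     mi = _index_map(machine_trace)
--     hi = _index_map(human_trace)
--     uniq = list(dict.fromkeys(labels))
--     vm = {}
--     vh = {}
--     for i, a in enumerate(uniq):
--         for b in uniq[i + 1:]:
--             key = a + ',' + b
--             vm[key] = mi.get((a, b), mi.get((b, a), 0))
--             vh[key] = hi.get((a, b), hi.get((b, a), 0))
--     return vm, vh
-- ===== Notes on version B (the rewrite author's own statement) =====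
-- stated objective: faster
-- what changed: Replaces the nested all-labels-by-all-labels loop with repeated 'in trace'/.index scans and a string-keyed seen set by: one-pass earliest-wins position tables per trace, dedup of the labels, and a single combinations pass over the unique labels doing O(1) table lookups per pair. Pre_ excludes label lists in which two different ordered pairs of labels share the same comma-joined string key (only possible when labels contain ','): there A's string-keyed seen set conflates distinct label pairs, so the emitted key set is an accident of the encoding.
import Mathlib
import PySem

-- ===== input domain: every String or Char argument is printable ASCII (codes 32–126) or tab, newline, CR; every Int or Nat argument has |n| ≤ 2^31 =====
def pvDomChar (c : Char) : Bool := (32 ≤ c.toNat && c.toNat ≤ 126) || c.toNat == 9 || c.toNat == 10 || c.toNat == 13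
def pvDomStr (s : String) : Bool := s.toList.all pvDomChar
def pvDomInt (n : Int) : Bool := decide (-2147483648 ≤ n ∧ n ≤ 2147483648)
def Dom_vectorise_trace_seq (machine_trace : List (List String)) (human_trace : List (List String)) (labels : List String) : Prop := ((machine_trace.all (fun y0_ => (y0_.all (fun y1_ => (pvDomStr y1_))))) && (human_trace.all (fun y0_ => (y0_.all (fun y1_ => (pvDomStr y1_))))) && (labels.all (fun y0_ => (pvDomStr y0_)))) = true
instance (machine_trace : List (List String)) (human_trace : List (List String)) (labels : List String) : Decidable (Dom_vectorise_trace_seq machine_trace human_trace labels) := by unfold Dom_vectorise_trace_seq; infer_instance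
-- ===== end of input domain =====

-- B replaces A's nested all-labels-by-all-labels loop (with its repeated `in trace`/`.index` scans and
-- string-keyed seen set) by one-pass earliest-wins position tables per trace, dedup of the labels and a
-- single combinations pass over the unique labels.

-- ===== PORT A =====
-- literal transliteration of A's nested loop; trace.index(x) is guarded by membership,
-- so PySem.List.index? is some there and `.getD 0` is exact
def vectorise_trace_seq (machine_trace : List (List String)) (human_trace : List (List String)) (labels : List String) : (List (String × Int)) × (List (String × Int)) :=
  let st :=
    labels.foldl
      (fun st l1 =>
        labels.foldl
          (fun (st : PySem.Dict String Int × PySem.Dict String Int) l2 =>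
            if l1 ≠ l2 ∧
                ¬(st.1.contains (l1 ++ "," ++ l2) = true ∨ st.2.contains (l1 ++ "," ++ l2) = true) ∧
                ¬(st.1.contains (l2 ++ "," ++ l1) = true ∨ st.2.contains (l2 ++ "," ++ l1) = true) then
              let vm := st.1.insert (l1 ++ "," ++ l2) 0
              let vh := st.2.insert (l1 ++ "," ++ l2) 0
              let vm :=
                if [l1, l2] ∈ machine_trace ∨ [l2, l1] ∈ machine_trace then
                  if [l1, l2] ∈ machine_trace then
                    vm.insert (l1 ++ "," ++ l2) (((PySem.List.index? machine_trace [l1, l2]).getD 0 : Nat) + 1)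
                  else if [l2, l1] ∈ machine_trace then
                    vm.insert (l1 ++ "," ++ l2) (((PySem.List.index? machine_trace [l2, l1]).getD 0 : Nat) + 1)
                  else vm
                else vm
              let vh :=
                if [l1, l2] ∈ human_trace ∨ [l2, l1] ∈ human_trace then
                  if [l1, l2] ∈ human_trace then
                    vh.insert (l1 ++ "," ++ l2) (((PySem.List.index? human_trace [l1, l2]).getD 0 : Nat) + 1)
                  else if [l2, l1] ∈ human_trace then
                    vh.insert (l1 ++ "," ++ l2) (((PySem.List.index? human_trace [l2, l1]).getD 0 : Nat) + 1)
                  else vh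
                else vh
              (vm, vh)
            else st)
          st)
      (PySem.Dict.empty, PySem.Dict.empty)
  (st.1.items, st.2.items)

-- ===== PORT B =====
-- earliest-wins map: 2-element step ↦ its 1-based position in the trace (Source B's _index_map)
def pvIndexMap (trace : List (List String)) : PySem.Dict (String × String) Int :=
  (PySem.List.enumerate trace).foldl
    (fun idx p =>
      match p.2 with
      | [a, b] => if idx.contains (a, b) = false then idx.insert (a, b) (p.1 + 1) else idx
      | _ => idx)
    PySem.Dict.empty

def vectorise_trace_seq_alt (machine_trace : List (List String)) (human_trace : List (List String)) (labels : List String) : (List (String × Int)) × (List (String × Int)) :=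
  let mi := pvIndexMap machine_trace
  let hi := pvIndexMap human_trace
  let uniq := PySem.List.dedup labels
  let st :=
    (PySem.List.enumerate uniq).foldl
      (fun (st : PySem.Dict String Int × PySem.Dict String Int) p =>
        (PySem.List.slice uniq (some (p.1 + 1)) none).foldl
          (fun st b =>
            (st.1.insert (p.2 ++ "," ++ b) (mi.getD (p.2, b) (mi.getD (b, p.2) 0)),
             st.2.insert (p.2 ++ "," ++ b) (hi.getD (p.2, b) (hi.getD (b, p.2) 0))))
          st)
      (PySem.Dict.empty, PySem.Dict.empty)
  (st.1.items, st.2.items)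

-- ===== PRECONDITION & SPEC =====
-- Pre_ excludes label lists in which two different ordered pairs of labels share the same
-- comma-joined string key (possible only when labels themselves contain ','): there A's
-- string-keyed seen set conflates distinct label pairs, so the emitted key set is an
-- accident of the encoding.
def Pre_vectorise_trace_seq (machine_trace : List (List String)) (human_trace : List (List String)) (labels : List String) : Prop :=
  ∀ a ∈ labels, ∀ b ∈ labels, ∀ c ∈ labels, ∀ d ∈ labels,
    a ++ "," ++ b = c ++ "," ++ d → a = c ∧ b = d
instance (machine_trace : List (List String)) (human_trace : List (List String)) (labels : List String) : Decidable (Pre_vectorise_trace_seq machine_trace human_trace labels) := by unfold Pre_vectorise_trace_seq; infer_instance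

def pvWitness_vectorise_trace_seq : List (List String) × List (List String) × List String :=
  ([["a", "b"], ["c", "a"]], [["b", "c"]], ["a", "b", "c"])

def Spec_vectorise_trace_seq (machine_trace : List (List String)) (human_trace : List (List String)) (labels : List String) (out : (List (String × Int)) × (List (String × Int))) : Prop := out = vectorise_trace_seq_alt machine_trace human_trace labels
instance (machine_trace : List (List String)) (human_trace : List (List String)) (labels : List String) (out : (List (String × Int)) × (List (String × Int))) : Decidable (Spec_vectorise_trace_seq machine_trace human_trace labels out) := by unfold Spec_vectorise_trace_seq; infer_instance

-- ===== CLAIM (what is proved, stated in full; the proofs are below) =====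
def Claim_equal_vectorise_trace_seq : Prop := ∀ (machine_trace : List (List String)) (human_trace : List (List String)) (labels : List String), Dom_vectorise_trace_seq machine_trace human_trace labels → Pre_vectorise_trace_seq machine_trace human_trace labels → Spec_vectorise_trace_seq machine_trace human_trace labels (vectorise_trace_seq machine_trace human_trace labels)

-- ===== LEMMAS AND PROOFS =====

-- the comma-joined key of a label pair
def pvEnc (q : String × String) : String := q.1 ++ "," ++ q.2

-- the value A stores for a (fresh) pair
def pvEntry (trace : List (List String)) (q : String × String) : Int :=
  if [q.1, q.2] ∈ trace then ((PySem.List.index? trace [q.1, q.2]).getD 0 : Nat) + 1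
  else if [q.2, q.1] ∈ trace then ((PySem.List.index? trace [q.2, q.1]).getD 0 : Nat) + 1
  else 0

-- the value B stores for a pair (the two-level .get chain on the index table)
def pvValB (trace : List (List String)) (q : String × String) : Int :=
  (pvIndexMap trace).getD (q.1, q.2) ((pvIndexMap trace).getD (q.2, q.1) 0)

-- A's evolving pair list: append a pair iff it is off-diagonal and new in both orientations
def pvAdd : List (String × String) → List (String × String) → List (String × String)
  | P, [] => P
  | P, q :: L => pvAdd (if q.1 ≠ q.2 ∧ q ∉ P ∧ (q.2, q.1) ∉ P then P ++ [q] else P) L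

-- combinations: every element of d paired with all later elements of d and all of t
def pvCombA : List String → List String → List (String × String)
  | [], _ => []
  | a :: d, t => (d ++ t).map (fun b => (a, b)) ++ pvCombA d t

-- A's dict pair as a function of the pair list
def pvStA (mt ht : List (List String)) (P : List (String × String)) :
    PySem.Dict String Int × PySem.Dict String Int :=
  (PySem.Dict.mk (P.map (fun q => (pvEnc q, pvEntry mt q))),
   PySem.Dict.mk (P.map (fun q => (pvEnc q, pvEntry ht q))))

-- what Pre_ gives: the comma-joined key determines the ordered label pair
def pvKeyInj (labels : List String) : Prop :=
  ∀ p q : String × String, p.1 ∈ labels → p.2 ∈ labels → q.1 ∈ labels → q.2 ∈ labels →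
    pvEnc p = pvEnc q → p = q

lemma pvCombA_fst_mem {q : String × String} : ∀ {d t : List String}, q ∈ pvCombA d t → q.1 ∈ d := by
  intro d
  induction d with
  | nil => intro t h; simp [pvCombA] at h
  | cons a d ih =>
    intro t h
    simp only [pvCombA, List.mem_append, List.mem_map] at h
    rcases h with ⟨b, _, rfl⟩ | h
    · exact List.mem_cons_self ..
    · exact List.mem_cons_of_mem _ (ih h)

lemma pvCombA_snd_mem {q : String × String} : ∀ {d t : List String}, q ∈ pvCombA d t → q.2 ∈ d ++ t := by
  intro d
  induction d with
  | nil => intro t h; simp [pvCombA] at h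
  | cons a d ih =>
    intro t h
    rw [show pvCombA (a :: d) t = (d ++ t).map (fun b => (a, b)) ++ pvCombA d t from rfl] at h
    rcases List.mem_append.mp h with h | h
    · obtain ⟨b, hb, rfl⟩ := List.mem_map.mp h
      rw [List.cons_append]
      exact List.mem_cons_of_mem _ hb
    · have h2 := ih h
      rw [List.cons_append]
      exact List.mem_cons_of_mem _ h2

lemma pvCombA_snoc (a : String) : ∀ (d t : List String),
    pvCombA (d ++ [a]) t = pvCombA d (a :: t) ++ t.map (fun b => (a, b)) := by
  intro d
  induction d with
  | nil => intro t; simp [pvCombA]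
  | cons x d ih =>
    intro t
    simp only [List.cons_append, pvCombA, ih, List.append_assoc]
    simp

-- every other element of d ++ t is paired with a (in one orientation) once a ∈ d
lemma pvCombA_cover {a y : String} : ∀ {d t : List String}, (d ++ t).Nodup → a ∈ d →
    y ∈ d ++ t → y ≠ a → (a, y) ∈ pvCombA d t ∨ (y, a) ∈ pvCombA d t := by
  intro d
  induction d with
  | nil => intro t _ h; simp at h
  | cons x d ih =>
    intro t hnd ha hy hne
    rw [List.cons_append] at hnd hy
    have hnd' := List.nodup_cons.mp hnd
    rcases List.mem_cons.mp ha with rfl | had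
    · left
      have hy' : y ∈ d ++ t := by
        rcases List.mem_cons.mp hy with h | h
        · exact absurd h hne
        · exact h
      show (a, y) ∈ (d ++ t).map (fun b => (a, b)) ++ pvCombA d t
      exact List.mem_append_left _ (List.mem_map.mpr ⟨y, hy', rfl⟩)
    · rcases List.mem_cons.mp hy with rfl | hy'
      · right
        show (y, a) ∈ (d ++ t).map (fun b => (y, b)) ++ pvCombA d t
        exact List.mem_append_left _ (List.mem_map.mpr ⟨a, List.mem_append_left _ had, rfl⟩)
      · rcases ih hnd'.2 had hy' hne with h | h
        · left
          show (a, y) ∈ (d ++ t).map (fun b => (x, b)) ++ pvCombA d t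
          exact List.mem_append_right _ h
        · right
          show (y, a) ∈ (d ++ t).map (fun b => (x, b)) ++ pvCombA d t
          exact List.mem_append_right _ h

lemma pvCombA_nodup_enc (labels : List String) (hinj : pvKeyInj labels) :
    ∀ {d t : List String}, (d ++ t).Nodup → (∀ x ∈ d ++ t, x ∈ labels) →
      ((pvCombA d t).map pvEnc).Nodup := by
  intro d
  induction d with
  | nil => intro t _ _; simp [pvCombA]
  | cons a d ih =>
    intro t hnd hsub
    have hnd0 : (a :: (d ++ t)).Nodup := by rwa [List.cons_append] at hnd
    have hnd' := List.nodup_cons.mp hnd0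
    have hsa : a ∈ labels := hsub a (by simp)
    have hsub' : ∀ x ∈ d ++ t, x ∈ labels := fun x hx =>
      hsub x (by rw [List.cons_append]; exact List.mem_cons_of_mem _ hx)
    show (((d ++ t).map (fun b => (a, b)) ++ pvCombA d t).map pvEnc).Nodup
    rw [List.map_append, List.nodup_append]
    refine ⟨?_, ih hnd'.2 hsub', ?_⟩
    · rw [List.map_map]
      refine List.Nodup.map_on ?_ hnd'.2
      intro b1 hb1 b2 hb2 hb
      have heq := hinj (a, b1) (a, b2) hsa (hsub' b1 hb1) hsa (hsub' b2 hb2) hb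
      exact congrArg Prod.snd heq
    · intro s hs1 s' hs2 heq
      subst heq
      rw [List.map_map] at hs1
      obtain ⟨b, hb, rfl⟩ := List.mem_map.mp hs1
      obtain ⟨r, hr, he⟩ := List.mem_map.mp hs2
      have hrd : r.1 ∈ d := pvCombA_fst_mem hr
      have hr2 : r.2 ∈ d ++ t := pvCombA_snd_mem hr
      have hra : r = (a, b) := hinj r (a, b) (hsub' r.1 (List.mem_append_left _ hrd))
        (hsub' r.2 hr2) hsa (hsub' b hb) he
      exact hnd'.1 (List.mem_append_left _ (by rw [← show r.1 = a from congrArg Prod.fst hra]; exact hrd))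

-- ----- A side: the dict state is determined by the pair list -----

lemma pvStA_contains (mt ht : List (List String)) (labels : List String) (hinj : pvKeyInj labels)
    (P : List (String × String)) (hP : ∀ r ∈ P, r.1 ∈ labels ∧ r.2 ∈ labels)
    {q : String × String} (hq1 : q.1 ∈ labels) (hq2 : q.2 ∈ labels) :
    ((pvStA mt ht P).1.contains (pvEnc q) = true ↔ q ∈ P) ∧
    ((pvStA mt ht P).2.contains (pvEnc q) = true ↔ q ∈ P) := by
  have key : ∀ (tr : List (List String)),
      ((PySem.Dict.mk (P.map (fun r => (pvEnc r, pvEntry tr r)))).contains (pvEnc q) = true ↔ q ∈ P) := by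
    intro tr
    rw [PySem.Dict.contains_eq_decide_mem_keys, PySem.Dict.keys_mk, decide_eq_true_eq, List.map_map]
    constructor
    · intro h
      obtain ⟨p, hp, he⟩ := List.mem_map.mp h
      have hpq : p = q := hinj p q (hP p hp).1 (hP p hp).2 hq1 hq2 he
      rwa [← hpq]
    · intro h
      exact List.mem_map.mpr ⟨q, h, rfl⟩
  exact ⟨key mt, key ht⟩

lemma pvA_step (mt ht : List (List String)) (labels : List String) (hinj : pvKeyInj labels)
    (l1 l2 : String) (h1 : l1 ∈ labels) (h2 : l2 ∈ labels)
    (P : List (String × String)) (hP : ∀ q ∈ P, q.1 ∈ labels ∧ q.2 ∈ labels) :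
    (fun (st : PySem.Dict String Int × PySem.Dict String Int) l2 =>
        if l1 ≠ l2 ∧
            ¬(st.1.contains (l1 ++ "," ++ l2) = true ∨ st.2.contains (l1 ++ "," ++ l2) = true) ∧
            ¬(st.1.contains (l2 ++ "," ++ l1) = true ∨ st.2.contains (l2 ++ "," ++ l1) = true) then
          let vm := st.1.insert (l1 ++ "," ++ l2) 0
          let vh := st.2.insert (l1 ++ "," ++ l2) 0
          let vm :=
            if [l1, l2] ∈ mt ∨ [l2, l1] ∈ mt then
              if [l1, l2] ∈ mt then
                vm.insert (l1 ++ "," ++ l2) (((PySem.List.index? mt [l1, l2]).getD 0 : Nat) + 1)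
              else if [l2, l1] ∈ mt then
                vm.insert (l1 ++ "," ++ l2) (((PySem.List.index? mt [l2, l1]).getD 0 : Nat) + 1)
              else vm
            else vm
          let vh :=
            if [l1, l2] ∈ ht ∨ [l2, l1] ∈ ht then
              if [l1, l2] ∈ ht then
                vh.insert (l1 ++ "," ++ l2) (((PySem.List.index? ht [l1, l2]).getD 0 : Nat) + 1)
              else if [l2, l1] ∈ ht then
                vh.insert (l1 ++ "," ++ l2) (((PySem.List.index? ht [l2, l1]).getD 0 : Nat) + 1)
              else vh
            else vh
          (vm, vh)
        else st) (pvStA mt ht P) l2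
      = pvStA mt ht (if l1 ≠ l2 ∧ (l1, l2) ∉ P ∧ (l2, l1) ∉ P then P ++ [(l1, l2)] else P) := by
  have hc12 := pvStA_contains mt ht labels hinj P hP (q := (l1, l2)) h1 h2
  have hc21 := pvStA_contains mt ht labels hinj P hP (q := (l2, l1)) h2 h1
  simp only [pvEnc] at hc12 hc21
  simp only []
  by_cases hc : l1 ≠ l2 ∧ (l1, l2) ∉ P ∧ (l2, l1) ∉ P
  · have hcond : l1 ≠ l2 ∧
        ¬((pvStA mt ht P).1.contains (l1 ++ "," ++ l2) = true ∨ (pvStA mt ht P).2.contains (l1 ++ "," ++ l2) = true) ∧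
        ¬((pvStA mt ht P).1.contains (l2 ++ "," ++ l1) = true ∨ (pvStA mt ht P).2.contains (l2 ++ "," ++ l1) = true) := by
      refine ⟨hc.1, ?_, ?_⟩
      · rintro (h | h)
        · exact hc.2.1 (hc12.1.mp h)
        · exact hc.2.1 (hc12.2.mp h)
      · rintro (h | h)
        · exact hc.2.2 (hc21.1.mp h)
        · exact hc.2.2 (hc21.2.mp h)
    rw [if_pos hcond, if_pos hc]
    have hfresh1 : (pvStA mt ht P).1.contains (l1 ++ "," ++ l2) = false := by
      cases hb : (pvStA mt ht P).1.contains (l1 ++ "," ++ l2) with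
      | false => rfl
      | true => exact absurd (hc12.1.mp hb) hc.2.1
    have hfresh2 : (pvStA mt ht P).2.contains (l1 ++ "," ++ l2) = false := by
      cases hb : (pvStA mt ht P).2.contains (l1 ++ "," ++ l2) with
      | false => rfl
      | true => exact absurd (hc12.2.mp hb) hc.2.1
    have hinsM : ∀ (v : Int), (pvStA mt ht P).1.insert (l1 ++ "," ++ l2) v
        = PySem.Dict.mk (P.map (fun q => (pvEnc q, pvEntry mt q)) ++ [(l1 ++ "," ++ l2, v)]) := by
      intro v
      apply PySem.Dict.ext
      rw [PySem.Dict.items_insert_of_not_contains _ _ hfresh1]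
      rfl
    have hinsH : ∀ (v : Int), (pvStA mt ht P).2.insert (l1 ++ "," ++ l2) v
        = PySem.Dict.mk (P.map (fun q => (pvEnc q, pvEntry ht q)) ++ [(l1 ++ "," ++ l2, v)]) := by
      intro v
      apply PySem.Dict.ext
      rw [PySem.Dict.items_insert_of_not_contains _ _ hfresh2]
      rfl
    refine Prod.ext ?_ ?_
    · show (if [l1, l2] ∈ mt ∨ [l2, l1] ∈ mt then _ else _) = _
      split_ifs with hAB hA hB
      · rw [PySem.Dict.insert_insert_self, hinsM]
        show PySem.Dict.mk _ = PySem.Dict.mk ((P ++ [(l1, l2)]).map (fun q => (pvEnc q, pvEntry mt q)))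
        rw [List.map_append]
        simp [pvEnc, pvEntry, hA]
      · rw [PySem.Dict.insert_insert_self, hinsM]
        show PySem.Dict.mk _ = PySem.Dict.mk ((P ++ [(l1, l2)]).map (fun q => (pvEnc q, pvEntry mt q)))
        rw [List.map_append]
        simp [pvEnc, pvEntry, hA, hB]
      · rcases hAB with h | h <;> contradiction
      · rw [hinsM]
        show PySem.Dict.mk _ = PySem.Dict.mk ((P ++ [(l1, l2)]).map (fun q => (pvEnc q, pvEntry mt q)))
        rw [List.map_append]
        rw [not_or] at hAB
        simp [pvEnc, pvEntry, hAB.1, hAB.2]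
    · show (if [l1, l2] ∈ ht ∨ [l2, l1] ∈ ht then _ else _) = _
      split_ifs with hAB hA hB
      · rw [PySem.Dict.insert_insert_self, hinsH]
        show PySem.Dict.mk _ = PySem.Dict.mk ((P ++ [(l1, l2)]).map (fun q => (pvEnc q, pvEntry ht q)))
        rw [List.map_append]
        simp [pvEnc, pvEntry, hA]
      · rw [PySem.Dict.insert_insert_self, hinsH]
        show PySem.Dict.mk _ = PySem.Dict.mk ((P ++ [(l1, l2)]).map (fun q => (pvEnc q, pvEntry ht q)))
        rw [List.map_append]
        simp [pvEnc, pvEntry, hA, hB]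
      · rcases hAB with h | h <;> contradiction
      · rw [hinsH]
        show PySem.Dict.mk _ = PySem.Dict.mk ((P ++ [(l1, l2)]).map (fun q => (pvEnc q, pvEntry ht q)))
        rw [List.map_append]
        rw [not_or] at hAB
        simp [pvEnc, pvEntry, hAB.1, hAB.2]
  · have hcond : ¬(l1 ≠ l2 ∧
        ¬((pvStA mt ht P).1.contains (l1 ++ "," ++ l2) = true ∨ (pvStA mt ht P).2.contains (l1 ++ "," ++ l2) = true) ∧
        ¬((pvStA mt ht P).1.contains (l2 ++ "," ++ l1) = true ∨ (pvStA mt ht P).2.contains (l2 ++ "," ++ l1) = true)) := by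
      intro h
      refine hc ⟨h.1, ?_, ?_⟩
      · intro hm
        exact h.2.1 (Or.inl (hc12.1.mpr hm))
      · intro hm
        exact h.2.2 (Or.inl (hc21.1.mpr hm))
    rw [if_neg hcond, if_neg hc]

lemma pvAdd_append (L1 : List (String × String)) : ∀ (P L2 : List (String × String)),
    pvAdd P (L1 ++ L2) = pvAdd (pvAdd P L1) L2 := by
  induction L1 with
  | nil => intro P L2; rfl
  | cons q L ih =>
    intro P L2
    simp only [List.cons_append, pvAdd]
    exact ih _ _

lemma pvAdd_mem : ∀ (L P : List (String × String)) (q : String × String),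
    q ∈ pvAdd P L → q ∈ P ∨ q ∈ L := by
  intro L
  induction L with
  | nil => intro P q h; exact Or.inl h
  | cons p L ih =>
    intro P q h
    simp only [pvAdd] at h
    rcases ih _ q h with h' | h'
    · by_cases hcnd : p.1 ≠ p.2 ∧ p ∉ P ∧ (p.2, p.1) ∉ P
      · rw [if_pos hcnd] at h'
        rcases List.mem_append.mp h' with h'' | h''
        · exact Or.inl h''
        · exact Or.inr (by simp [List.mem_singleton.mp h''])
      · rw [if_neg hcnd] at h'
        exact Or.inl h'
    · exact Or.inr (List.mem_cons_of_mem _ h')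

lemma pvA_fold_inner (mt ht : List (List String)) (labels : List String) (hinj : pvKeyInj labels)
    (l1 : String) (h1 : l1 ∈ labels) :
    ∀ (ys : List String), (∀ a ∈ ys, a ∈ labels) →
      ∀ (P : List (String × String)), (∀ q ∈ P, q.1 ∈ labels ∧ q.2 ∈ labels) →
    ys.foldl
      (fun (st : PySem.Dict String Int × PySem.Dict String Int) l2 =>
              if l1 ≠ l2 ∧
                  ¬(st.1.contains (l1 ++ "," ++ l2) = true ∨ st.2.contains (l1 ++ "," ++ l2) = true) ∧
                  ¬(st.1.contains (l2 ++ "," ++ l1) = true ∨ st.2.contains (l2 ++ "," ++ l1) = true) then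
                let vm := st.1.insert (l1 ++ "," ++ l2) 0
                let vh := st.2.insert (l1 ++ "," ++ l2) 0
                let vm :=
                  if [l1, l2] ∈ mt ∨ [l2, l1] ∈ mt then
                    if [l1, l2] ∈ mt then
                      vm.insert (l1 ++ "," ++ l2) (((PySem.List.index? mt [l1, l2]).getD 0 : Nat) + 1)
                    else if [l2, l1] ∈ mt then
                      vm.insert (l1 ++ "," ++ l2) (((PySem.List.index? mt [l2, l1]).getD 0 : Nat) + 1)
                    else vm
                  else vm
                let vh :=
                  if [l1, l2] ∈ ht ∨ [l2, l1] ∈ ht then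
                    if [l1, l2] ∈ ht then
                      vh.insert (l1 ++ "," ++ l2) (((PySem.List.index? ht [l1, l2]).getD 0 : Nat) + 1)
                    else if [l2, l1] ∈ ht then
                      vh.insert (l1 ++ "," ++ l2) (((PySem.List.index? ht [l2, l1]).getD 0 : Nat) + 1)
                    else vh
                  else vh
                (vm, vh)
              else st)
      (pvStA mt ht P)
    = pvStA mt ht (pvAdd P (ys.map (fun b => (l1, b)))) := by
  intro ys
  induction ys with
  | nil => intro _ P _; rfl
  | cons l2 ys ih =>
    intro hys P hP
    have h2 : l2 ∈ labels := hys l2 (by simp)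
    rw [List.foldl_cons]
    refine Eq.trans (congrArg (fun s => List.foldl _ s ys) (pvA_step mt ht labels hinj l1 l2 h1 h2 P hP)) ?_
    simp only [List.map_cons, pvAdd]
    by_cases hcnd : l1 ≠ l2 ∧ (l1, l2) ∉ P ∧ (l2, l1) ∉ P
    · rw [if_pos hcnd]
      refine ih (fun a ha => hys a (by simp [ha])) (P ++ [(l1, l2)]) ?_
      intro q hq
      rcases List.mem_append.mp hq with h | h
      · exact hP q h
      · have hql : q = (l1, l2) := by simpa using h
        rw [hql]
        exact ⟨h1, h2⟩
    · rw [if_neg hcnd]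
      exact ih (fun a ha => hys a (by simp [ha])) P hP

lemma pvA_fold (mt ht : List (List String)) (labels : List String) (hinj : pvKeyInj labels) :
    ∀ (xs : List String), (∀ a ∈ xs, a ∈ labels) →
      ∀ (P : List (String × String)), (∀ q ∈ P, q.1 ∈ labels ∧ q.2 ∈ labels) →
    xs.foldl
      (fun st l1 =>
          labels.foldl
            (fun (st : PySem.Dict String Int × PySem.Dict String Int) l2 =>
                    if l1 ≠ l2 ∧
                        ¬(st.1.contains (l1 ++ "," ++ l2) = true ∨ st.2.contains (l1 ++ "," ++ l2) = true) ∧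
                        ¬(st.1.contains (l2 ++ "," ++ l1) = true ∨ st.2.contains (l2 ++ "," ++ l1) = true) then
                      let vm := st.1.insert (l1 ++ "," ++ l2) 0
                      let vh := st.2.insert (l1 ++ "," ++ l2) 0
                      let vm :=
                        if [l1, l2] ∈ mt ∨ [l2, l1] ∈ mt then
                          if [l1, l2] ∈ mt then
                            vm.insert (l1 ++ "," ++ l2) (((PySem.List.index? mt [l1, l2]).getD 0 : Nat) + 1)
                          else if [l2, l1] ∈ mt then
                            vm.insert (l1 ++ "," ++ l2) (((PySem.List.index? mt [l2, l1]).getD 0 : Nat) + 1)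
                          else vm
                        else vm
                      let vh :=
                        if [l1, l2] ∈ ht ∨ [l2, l1] ∈ ht then
                          if [l1, l2] ∈ ht then
                            vh.insert (l1 ++ "," ++ l2) (((PySem.List.index? ht [l1, l2]).getD 0 : Nat) + 1)
                          else if [l2, l1] ∈ ht then
                            vh.insert (l1 ++ "," ++ l2) (((PySem.List.index? ht [l2, l1]).getD 0 : Nat) + 1)
                          else vh
                        else vh
                      (vm, vh)
                    else st)
            st)
      (pvStA mt ht P)
    = pvStA mt ht (pvAdd P (xs.flatMap (fun a => labels.map (fun b => (a, b))))) := by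
  intro xs
  induction xs with
  | nil => intro _ P _; rfl
  | cons l1 xs ih =>
    intro hxs P hP
    rw [List.foldl_cons, pvA_fold_inner mt ht labels hinj l1 (hxs l1 (by simp)) labels (fun a ha => ha) P hP,
      List.flatMap_cons, pvAdd_append]
    refine ih (fun a ha => hxs a (by simp [ha])) _ ?_
    intro q hq
    rcases pvAdd_mem _ _ _ hq with h | h
    · exact hP q h
    · obtain ⟨b, hb, rfl⟩ := List.mem_map.mp h
      exact ⟨hxs l1 (by simp), hb⟩

-- ----- the combinatorial core -----

lemma pvAdd_map (a : String) : ∀ (ys : List String) (P : List (String × String)),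
    pvAdd P (ys.map (fun b => (a, b)))
      = P ++ ((PySem.List.dedup ys).filter
          (fun y => decide (a ≠ y ∧ (a, y) ∉ P ∧ (y, a) ∉ P))).map (fun b => (a, b)) := by
  intro ys
  induction ys with
  | nil =>
    intro P
    simp [pvAdd, PySem.List.dedup_eq_ofList]
  | cons y ys ih =>
    intro P
    have hded : PySem.List.dedup (y :: ys) = y :: (PySem.List.dedup ys).filter (fun z => !(z == y)) := by
      simp only [PySem.List.dedup_eq_ofList, PySem.Set.ofList_cons]
      rfl
    rw [List.map_cons]
    simp only [pvAdd]
    rw [hded]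
    by_cases hcnd : a ≠ y ∧ (a, y) ∉ P ∧ (y, a) ∉ P
    · rw [if_pos hcnd, ih, List.filter_cons, if_pos (show decide (a ≠ y ∧ (a, y) ∉ P ∧ (y, a) ∉ P) = true from decide_eq_true hcnd), List.map_cons,
        List.filter_filter]
      have hfc : List.filter (fun z => decide (a ≠ z ∧ (a, z) ∉ P ++ [(a, y)] ∧ (z, a) ∉ P ++ [(a, y)]))
            (PySem.List.dedup ys)
          = List.filter (fun z => decide (a ≠ z ∧ (a, z) ∉ P ∧ (z, a) ∉ P) && !(z == y))
            (PySem.List.dedup ys) := by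
        apply List.filter_congr
        intro z _
        by_cases hzy : z = y
        · subst hzy
          simp only [beq_self_eq_true, Bool.not_true, Bool.and_false]
          apply decide_eq_false
          rintro ⟨_, hmem, _⟩
          exact hmem (by simp)
        · have hz : (z == y) = false := by simpa using hzy
          simp only [hz, Bool.not_false, Bool.and_true]
          apply decide_eq_decide.mpr
          constructor
          · rintro ⟨ha1, ha2, ha3⟩
            exact ⟨ha1, fun m => ha2 (List.mem_append_left _ m), fun m => ha3 (List.mem_append_left _ m)⟩
          · rintro ⟨ha1, ha2, ha3⟩
            refine ⟨ha1, ?_, ?_⟩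
            · intro m
              rcases List.mem_append.mp m with m | m
              · exact ha2 m
              · have hzy' : z = y := by simpa using congrArg Prod.snd (List.mem_singleton.mp m)
                exact absurd hzy' hzy
            · intro m
              rcases List.mem_append.mp m with m | m
              · exact ha3 m
              · have hza : z = a := by simpa using congrArg Prod.fst (List.mem_singleton.mp m)
                exact ha1 hza.symm
      rw [hfc]
      simp [List.append_assoc]
    · rw [if_neg hcnd, ih, List.filter_cons,
        if_neg (show ¬(decide (a ≠ y ∧ (a, y) ∉ P ∧ (y, a) ∉ P) = true) from by simp [decide_eq_false hcnd]),
        List.filter_filter]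
      have hfc : List.filter (fun z => decide (a ≠ z ∧ (a, z) ∉ P ∧ (z, a) ∉ P))
            (PySem.List.dedup ys)
          = List.filter (fun z => decide (a ≠ z ∧ (a, z) ∉ P ∧ (z, a) ∉ P) && !(z == y))
            (PySem.List.dedup ys) := by
        apply List.filter_congr
        intro z _
        by_cases hzy : z = y
        · subst hzy
          simp only [beq_self_eq_true, Bool.not_true, Bool.and_false]
          exact decide_eq_false hcnd
        · have hz : (z == y) = false := by simpa using hzy
          simp [hz]
      rw [hfc]

lemma pvOuter (ys : List String) :
    ∀ (xs d : List String), d.Nodup →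
      d ++ (PySem.List.dedup xs).filter (fun y => decide (y ∉ d)) = PySem.List.dedup ys →
      pvAdd (pvCombA d ((PySem.List.dedup xs).filter (fun y => decide (y ∉ d))))
          (xs.flatMap (fun a => ys.map (fun b => (a, b))))
        = pvCombA (PySem.List.dedup ys) [] := by
  intro xs
  induction xs with
  | nil =>
    intro d hnd hu
    simp only [List.flatMap_nil]
    have h0 : PySem.List.dedup ([] : List String) = [] := rfl
    rw [h0] at hu
    rw [h0]
    simp only [List.filter_nil, List.append_nil] at hu
    rw [← hu]
    rfl
  | cons a xs ih =>
    intro d hnd hu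
    rw [List.flatMap_cons, pvAdd_append, pvAdd_map]
    have hded : PySem.List.dedup (a :: xs) = a :: (PySem.List.dedup xs).filter (fun z => !(z == a)) := by
      simp only [PySem.List.dedup_eq_ofList, PySem.Set.ofList_cons]
      rfl
    by_cases had : a ∈ d
    · have hteq : (PySem.List.dedup (a :: xs)).filter (fun y => decide (y ∉ d))
          = (PySem.List.dedup xs).filter (fun y => decide (y ∉ d)) := by
        rw [hded, List.filter_cons, if_neg (show ¬(decide (a ∉ d) = true) from by simp [had]),
          List.filter_filter]
        apply List.filter_congr
        intro z _
        by_cases hza : z = a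
        · subst hza
          simp [had]
        · have hz : (z == a) = false := by simpa using hza
          simp [hz]
      rw [hteq] at hu ⊢
      have hnt : (d ++ (PySem.List.dedup xs).filter (fun y => decide (y ∉ d))).Nodup := by
        rw [List.nodup_append]
        refine ⟨hnd, (PySem.List.nodup_dedup xs).filter _, ?_⟩
        intro x hx x' hx' heq
        subst heq
        have hdec := List.of_mem_filter hx'
        exact (of_decide_eq_true hdec) hx
      have hfe : (PySem.List.dedup ys).filter
          (fun y => decide (a ≠ y ∧
            (a, y) ∉ pvCombA d ((PySem.List.dedup xs).filter (fun y => decide (y ∉ d))) ∧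
            (y, a) ∉ pvCombA d ((PySem.List.dedup xs).filter (fun y => decide (y ∉ d))))) = [] := by
        rw [List.filter_eq_nil_iff]
        intro y hy hpy
        have hp := of_decide_eq_true hpy
        have hy' : y ∈ d ++ (PySem.List.dedup xs).filter (fun y => decide (y ∉ d)) := by
          rw [hu]; exact hy
        rcases pvCombA_cover hnt had hy' (Ne.symm hp.1) with h | h
        · exact hp.2.1 h
        · exact hp.2.2 h
      rw [hfe, List.map_nil, List.append_nil]
      exact ih d hnd hu
    · have hfa : (PySem.List.dedup (a :: xs)).filter (fun y => decide (y ∉ d))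
          = a :: (PySem.List.dedup xs).filter (fun y => decide (y ∉ d ++ [a])) := by
        rw [hded, List.filter_cons, if_pos (show decide (a ∉ d) = true from by simp [had]),
          List.filter_filter]
        congr 1
        apply List.filter_congr
        intro z _
        by_cases hza : z = a
        · subst hza
          simp
        · have hz : (z == a) = false := by simpa using hza
          by_cases hzd : z ∈ d
          · simp [hz, hzd]
          · simp [hz, hzd, hza]
      rw [hfa] at hu ⊢
      have hnt : (d ++ a :: (PySem.List.dedup xs).filter (fun y => decide (y ∉ d ++ [a]))).Nodup := by
        rw [List.nodup_append]
        refine ⟨hnd, ?_, ?_⟩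
        · rw [List.nodup_cons]
          refine ⟨?_, (PySem.List.nodup_dedup xs).filter _⟩
          intro hmem
          have hdec := List.of_mem_filter hmem
          exact (of_decide_eq_true hdec) (by simp)
        · intro x hx x' hx' heq
          subst heq
          rcases List.mem_cons.mp hx' with heq' | hx''
          · exact had (heq' ▸ hx)
          · have hdec := List.of_mem_filter hx''
            exact (of_decide_eq_true hdec) (List.mem_append_left _ hx)
      have hfe : (PySem.List.dedup ys).filter
          (fun y => decide (a ≠ y ∧
            (a, y) ∉ pvCombA d (a :: (PySem.List.dedup xs).filter (fun y => decide (y ∉ d ++ [a]))) ∧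
            (y, a) ∉ pvCombA d (a :: (PySem.List.dedup xs).filter (fun y => decide (y ∉ d ++ [a])))))
          = (PySem.List.dedup xs).filter (fun y => decide (y ∉ d ++ [a])) := by
        rw [← hu, List.filter_append, List.filter_cons, if_neg (by simp)]
        have h1 : List.filter (fun y => decide (a ≠ y ∧
              (a, y) ∉ pvCombA d (a :: (PySem.List.dedup xs).filter (fun y => decide (y ∉ d ++ [a]))) ∧
              (y, a) ∉ pvCombA d (a :: (PySem.List.dedup xs).filter (fun y => decide (y ∉ d ++ [a]))))) d = [] := by
          rw [List.filter_eq_nil_iff]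
          intro y hy hpy
          have hp := of_decide_eq_true hpy
          have hya : y ≠ a := fun h => had (h ▸ hy)
          rcases pvCombA_cover (a := y) (y := a) hnt hy (by simp) (Ne.symm hya) with h | h
          · exact hp.2.2 h
          · exact absurd (pvCombA_fst_mem h) had
        have h2 : List.filter (fun y => decide (a ≠ y ∧
              (a, y) ∉ pvCombA d (a :: (PySem.List.dedup xs).filter (fun y => decide (y ∉ d ++ [a]))) ∧
              (y, a) ∉ pvCombA d (a :: (PySem.List.dedup xs).filter (fun y => decide (y ∉ d ++ [a])))))
              ((PySem.List.dedup xs).filter (fun y => decide (y ∉ d ++ [a])))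
            = (PySem.List.dedup xs).filter (fun y => decide (y ∉ d ++ [a])) := by
          rw [List.filter_eq_self]
          intro y hy
          have hdec := List.of_mem_filter hy
          have hynd : y ∉ d ++ [a] := of_decide_eq_true hdec
          apply decide_eq_true
          refine ⟨?_, ?_, ?_⟩
          · intro h
            exact hynd (by simp [h])
          · intro h
            exact absurd (pvCombA_fst_mem h) had
          · intro h
            exact hynd (List.mem_append_left _ (pvCombA_fst_mem h))
        rw [h1, h2, List.nil_append]
      rw [hfe, ← pvCombA_snoc]
      refine ih (d ++ [a]) ?_ ?_
      · exact List.Nodup.append hnd (List.nodup_singleton a)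
          (by intro x hx hx'; rw [List.mem_singleton] at hx'; subst hx'; exact had hx)
      · rw [List.append_assoc]
        exact hu

-- ----- B side -----

lemma pvIndexMap_snoc (xs : List (List String)) (x : List String) :
    pvIndexMap (xs ++ [x])
      = (match x with
         | [a, b] => if (pvIndexMap xs).contains (a, b) = false then
              (pvIndexMap xs).insert (a, b) ((xs.length : Int) + 1) else pvIndexMap xs
         | _ => pvIndexMap xs) := by
  unfold pvIndexMap
  rw [PySem.List.enumerate_append, List.foldl_append, PySem.List.enumerate_cons,
    PySem.List.enumerate_nil, List.foldl_cons, List.foldl_nil]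
  simp only [zero_add]

lemma pvIndexMap_get? (trace : List (List String)) :
    ∀ (a b : String), (pvIndexMap trace).get? (a, b)
      = (PySem.List.index? trace [a, b]).map (fun n => ((n : Nat) : Int) + 1) := by
  induction trace using List.reverseRecOn with
  | nil =>
    intro a b
    have h1 : PySem.List.index? ([] : List (List String)) [a, b] = none :=
      (PySem.List.index?_eq_none_iff _ _).mpr (by simp)
    rw [h1]
    rfl
  | append_singleton xs x ih =>
    intro a b
    have hgen : ∀ (_ : ([a, b] : List String) ≠ x),
        PySem.List.index? (xs ++ [x]) [a, b] = PySem.List.index? xs [a, b] := by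
      intro hne
      by_cases hm : ([a, b] : List String) ∈ xs
      · exact PySem.List.index?_append_of_mem _ hm
      · rw [(PySem.List.index?_eq_none_iff _ _).mpr hm,
          (PySem.List.index?_eq_none_iff _ _).mpr (by simp [hm, hne])]
    match x with
    | [] =>
      rw [show pvIndexMap (xs ++ [([] : List String)]) = pvIndexMap xs from pvIndexMap_snoc xs [],
        hgen (by simp)]
      exact ih a b
    | [c] =>
      rw [show pvIndexMap (xs ++ [[c]]) = pvIndexMap xs from pvIndexMap_snoc xs [c],
        hgen (by simp)]
      exact ih a b
    | c :: d :: e :: r =>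
      rw [show pvIndexMap (xs ++ [c :: d :: e :: r]) = pvIndexMap xs from pvIndexMap_snoc xs (c :: d :: e :: r),
        hgen (by simp)]
      exact ih a b
    | [c, d] =>
      rw [show pvIndexMap (xs ++ [[c, d]])
          = (if (pvIndexMap xs).contains (c, d) = false then
              (pvIndexMap xs).insert (c, d) ((xs.length : Int) + 1) else pvIndexMap xs)
          from pvIndexMap_snoc xs [c, d]]
      by_cases hcd : ([c, d] : List String) ∈ xs
      · have hcont : (pvIndexMap xs).contains (c, d) = true := by
          rw [PySem.Dict.contains_eq_isSome_get?, ih c d]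
          obtain ⟨k, hk⟩ := Option.isSome_iff_exists.mp ((PySem.List.index?_isSome_iff _ _).mpr hcd)
          rw [hk]
          rfl
        rw [if_neg (by simp [hcont])]
        by_cases hab : ([a, b] : List String) = [c, d]
        · obtain ⟨rfl, rfl⟩ : a = c ∧ b = d := by simpa using hab
          rw [ih, PySem.List.index?_append_of_mem _ hcd]
        · rw [hgen hab]
          exact ih a b
      · have hcont : (pvIndexMap xs).contains (c, d) = false := by
          rw [PySem.Dict.contains_eq_isSome_get?, ih c d,
            (PySem.List.index?_eq_none_iff _ _).mpr hcd]
          rfl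
        rw [if_pos hcont]
        by_cases hab : ((a : String), (b : String)) = (c, d)
        · obtain ⟨rfl, rfl⟩ : a = c ∧ b = d := by simpa [Prod.ext_iff] using hab
          rw [PySem.Dict.get?_insert_self,
            PySem.List.index?_append_singleton_self _ _ hcd]
          rfl
        · rw [PySem.Dict.get?_insert_of_ne _ _ hab]
          have hne : ([a, b] : List String) ≠ [c, d] := by
            intro h
            exact hab (by simpa [Prod.ext_iff] using h)
          rw [hgen hne]
          exact ih a b

lemma pvValB_eq (trace : List (List String)) (q : String × String) :
    pvValB trace q = pvEntry trace q := by
  unfold pvValB pvEntry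
  rw [PySem.Dict.getD_eq_get?_getD, PySem.Dict.getD_eq_get?_getD, pvIndexMap_get?, pvIndexMap_get?]
  by_cases hm1 : [q.1, q.2] ∈ trace
  · obtain ⟨k, hk⟩ := Option.isSome_iff_exists.mp ((PySem.List.index?_isSome_iff _ _).mpr hm1)
    rw [hk]
    simp [hm1]
  · rw [(PySem.List.index?_eq_none_iff _ _).mpr hm1]
    by_cases hm2 : [q.2, q.1] ∈ trace
    · obtain ⟨k, hk⟩ := Option.isSome_iff_exists.mp ((PySem.List.index?_isSome_iff _ _).mpr hm2)
      rw [hk]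
      simp [hm1, hm2]
    · rw [(PySem.List.index?_eq_none_iff _ _).mpr hm2]
      simp [hm1, hm2]

lemma pvB_fold (g : PySem.Dict String Int × PySem.Dict String Int → String × String →
      PySem.Dict String Int × PySem.Dict String Int) :
    ∀ (suf pre : List String) (st : PySem.Dict String Int × PySem.Dict String Int),
    (PySem.List.enumerate suf (pre.length : Int)).foldl
        (fun st p =>
          (PySem.List.slice (pre ++ suf) (some (p.1 + 1)) none).foldl
            (fun st b => g st (p.2, b)) st)
        st
      = (pvCombA suf []).foldl g st := by
  intro suf
  induction suf with
  | nil =>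
    intro pre st
    rw [PySem.List.enumerate_nil]
    rfl
  | cons a suf ih =>
    intro pre st
    rw [PySem.List.enumerate_cons]
    simp only [List.foldl_cons]
    have hslice : PySem.List.slice (pre ++ a :: suf) (some ((pre.length : Int) + 1)) none = suf := by
      rw [PySem.List.slice_from _ (by positivity)]
      have htn : ((pre.length : Int) + 1).toNat = pre.length + 1 := by omega
      rw [htn, List.drop_append]
      simp
    rw [hslice]
    have hrw1 : (pre.length : Int) + 1 = (((pre ++ [a]).length : Nat) : Int) := by
      simp
    have hrw2 : pre ++ a :: suf = (pre ++ [a]) ++ suf := by simp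
    rw [hrw1, hrw2, ih (pre ++ [a])]
    conv_rhs => rw [show pvCombA (a :: suf) [] = (suf ++ []).map (fun b => (a, b)) ++ pvCombA suf [] from rfl]
    rw [List.append_nil, List.foldl_append, List.foldl_map]

-- ===== VERDICT (by name: the statement is the Claim_ definition above) =====
theorem vectorise_trace_seq_spec : Claim_equal_vectorise_trace_seq := by
  intro mt ht labels _ hpre
  unfold Spec_vectorise_trace_seq
  have hinj : pvKeyInj labels := by
    intro p q h1 h2 h3 h4 he
    have h := hpre p.1 h1 p.2 h2 q.1 h3 q.2 h4 he
    exact Prod.ext h.1 h.2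
  have hmemd : ∀ a ∈ PySem.List.dedup labels, a ∈ labels :=
    fun a ha => (PySem.List.mem_dedup _ _).mp ha
  have hzA : vectorise_trace_seq mt ht labels =
      ((labels.foldl
          (fun st l1 =>
              labels.foldl
                (fun (st : PySem.Dict String Int × PySem.Dict String Int) l2 =>
                        if l1 ≠ l2 ∧
                            ¬(st.1.contains (l1 ++ "," ++ l2) = true ∨ st.2.contains (l1 ++ "," ++ l2) = true) ∧
                            ¬(st.1.contains (l2 ++ "," ++ l1) = true ∨ st.2.contains (l2 ++ "," ++ l1) = true) then
                          let vm := st.1.insert (l1 ++ "," ++ l2) 0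
                          let vh := st.2.insert (l1 ++ "," ++ l2) 0
                          let vm :=
                            if [l1, l2] ∈ mt ∨ [l2, l1] ∈ mt then
                              if [l1, l2] ∈ mt then
                                vm.insert (l1 ++ "," ++ l2) (((PySem.List.index? mt [l1, l2]).getD 0 : Nat) + 1)
                              else if [l2, l1] ∈ mt then
                                vm.insert (l1 ++ "," ++ l2) (((PySem.List.index? mt [l2, l1]).getD 0 : Nat) + 1)
                              else vm
                            else vm
                          let vh :=
                            if [l1, l2] ∈ ht ∨ [l2, l1] ∈ ht then
                              if [l1, l2] ∈ ht then
                                vh.insert (l1 ++ "," ++ l2) (((PySem.List.index? ht [l1, l2]).getD 0 : Nat) + 1)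
                              else if [l2, l1] ∈ ht then
                                vh.insert (l1 ++ "," ++ l2) (((PySem.List.index? ht [l2, l1]).getD 0 : Nat) + 1)
                              else vh
                            else vh
                          (vm, vh)
                        else st)
                st)
          (pvStA mt ht [])).1.items,
       (labels.foldl
          (fun st l1 =>
              labels.foldl
                (fun (st : PySem.Dict String Int × PySem.Dict String Int) l2 =>
                        if l1 ≠ l2 ∧
                            ¬(st.1.contains (l1 ++ "," ++ l2) = true ∨ st.2.contains (l1 ++ "," ++ l2) = true) ∧
                            ¬(st.1.contains (l2 ++ "," ++ l1) = true ∨ st.2.contains (l2 ++ "," ++ l1) = true) then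
                          let vm := st.1.insert (l1 ++ "," ++ l2) 0
                          let vh := st.2.insert (l1 ++ "," ++ l2) 0
                          let vm :=
                            if [l1, l2] ∈ mt ∨ [l2, l1] ∈ mt then
                              if [l1, l2] ∈ mt then
                                vm.insert (l1 ++ "," ++ l2) (((PySem.List.index? mt [l1, l2]).getD 0 : Nat) + 1)
                              else if [l2, l1] ∈ mt then
                                vm.insert (l1 ++ "," ++ l2) (((PySem.List.index? mt [l2, l1]).getD 0 : Nat) + 1)
                              else vm
                            else vm
                          let vh :=
                            if [l1, l2] ∈ ht ∨ [l2, l1] ∈ ht then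
                              if [l1, l2] ∈ ht then
                                vh.insert (l1 ++ "," ++ l2) (((PySem.List.index? ht [l1, l2]).getD 0 : Nat) + 1)
                              else if [l2, l1] ∈ ht then
                                vh.insert (l1 ++ "," ++ l2) (((PySem.List.index? ht [l2, l1]).getD 0 : Nat) + 1)
                              else vh
                            else vh
                          (vm, vh)
                        else st)
                st)
          (pvStA mt ht [])).2.items) := rfl
  have hfoldA := pvA_fold mt ht labels hinj labels (fun a ha => ha) [] (by intro q hq; simp at hq)
  have hcomb : pvAdd [] (labels.flatMap (fun a => labels.map (fun b => (a, b))))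
      = pvCombA (PySem.List.dedup labels) [] :=
    pvOuter labels labels [] List.nodup_nil (by simp)
  have hzB : vectorise_trace_seq_alt mt ht labels =
      (((PySem.List.enumerate (PySem.List.dedup labels)).foldl
          (fun (st : PySem.Dict String Int × PySem.Dict String Int) p =>
            (PySem.List.slice (PySem.List.dedup labels) (some (p.1 + 1)) none).foldl
              (fun st b => (st.1.insert (pvEnc (p.2, b)) (pvValB mt (p.2, b)),
                            st.2.insert (pvEnc (p.2, b)) (pvValB ht (p.2, b)))) st)
          (PySem.Dict.empty, PySem.Dict.empty)).1.items,
       ((PySem.List.enumerate (PySem.List.dedup labels)).foldl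
          (fun (st : PySem.Dict String Int × PySem.Dict String Int) p =>
            (PySem.List.slice (PySem.List.dedup labels) (some (p.1 + 1)) none).foldl
              (fun st b => (st.1.insert (pvEnc (p.2, b)) (pvValB mt (p.2, b)),
                            st.2.insert (pvEnc (p.2, b)) (pvValB ht (p.2, b)))) st)
          (PySem.Dict.empty, PySem.Dict.empty)).2.items) := rfl
  have hfoldB : (PySem.List.enumerate (PySem.List.dedup labels)).foldl
        (fun (st : PySem.Dict String Int × PySem.Dict String Int) p =>
          (PySem.List.slice (PySem.List.dedup labels) (some (p.1 + 1)) none).foldl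
            (fun st b => (st.1.insert (pvEnc (p.2, b)) (pvValB mt (p.2, b)),
                          st.2.insert (pvEnc (p.2, b)) (pvValB ht (p.2, b)))) st)
        (PySem.Dict.empty, PySem.Dict.empty)
      = (pvCombA (PySem.List.dedup labels) []).foldl
          (fun st q => (st.1.insert (pvEnc q) (pvValB mt q), st.2.insert (pvEnc q) (pvValB ht q)))
          (PySem.Dict.empty, PySem.Dict.empty) :=
    pvB_fold (fun st q => (st.1.insert (pvEnc q) (pvValB mt q), st.2.insert (pvEnc q) (pvValB ht q)))
      (PySem.List.dedup labels) [] (PySem.Dict.empty, PySem.Dict.empty)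
  have hsplit : (pvCombA (PySem.List.dedup labels) []).foldl
        (fun st q => (st.1.insert (pvEnc q) (pvValB mt q), st.2.insert (pvEnc q) (pvValB ht q)))
        (PySem.Dict.empty, PySem.Dict.empty)
      = ((pvCombA (PySem.List.dedup labels) []).foldl
            (fun d q => d.insert (pvEnc q) (pvValB mt q)) PySem.Dict.empty,
         (pvCombA (PySem.List.dedup labels) []).foldl
            (fun d q => d.insert (pvEnc q) (pvValB ht q)) PySem.Dict.empty) :=
    PySem.List.foldl_prod_mk (fun d q => d.insert (pvEnc q) (pvValB mt q))
      (fun d q => d.insert (pvEnc q) (pvValB ht q))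
      (pvCombA (PySem.List.dedup labels) []) PySem.Dict.empty PySem.Dict.empty
  have hnodup : ((pvCombA (PySem.List.dedup labels) []).map pvEnc).Nodup :=
    pvCombA_nodup_enc labels hinj
      (by rw [List.append_nil]; exact PySem.List.nodup_dedup labels)
      (by intro x hx; rw [List.append_nil] at hx; exact hmemd x hx)
  have hfin1 : (List.foldl (fun (d : PySem.Dict String Int) q => d.insert (pvEnc q) (pvValB mt q))
        PySem.Dict.empty (pvCombA (PySem.List.dedup labels) [])).items
      = (pvCombA (PySem.List.dedup labels) []).map (fun q => (pvEnc q, pvValB mt q)) := by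
    rw [PySem.Dict.items_foldl_insert_fresh _ pvEnc (pvValB mt) _
      (fun a _ => PySem.Dict.contains_empty _) hnodup]
    rfl
  have hfin2 : (List.foldl (fun (d : PySem.Dict String Int) q => d.insert (pvEnc q) (pvValB ht q))
        PySem.Dict.empty (pvCombA (PySem.List.dedup labels) [])).items
      = (pvCombA (PySem.List.dedup labels) []).map (fun q => (pvEnc q, pvValB ht q)) := by
    rw [PySem.Dict.items_foldl_insert_fresh _ pvEnc (pvValB ht) _
      (fun a _ => PySem.Dict.contains_empty _) hnodup]
    rfl
  rw [hzA, hfoldA, hcomb, hzB, hfoldB, hsplit]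
  refine Prod.ext ?_ ?_
  · show (pvStA mt ht (pvCombA (PySem.List.dedup labels) [])).1.items
      = (List.foldl (fun (d : PySem.Dict String Int) q => d.insert (pvEnc q) (pvValB mt q))
          PySem.Dict.empty (pvCombA (PySem.List.dedup labels) [])).items
    rw [hfin1]
    show (pvCombA (PySem.List.dedup labels) []).map (fun q => (pvEnc q, pvEntry mt q)) = _
    apply List.map_congr_left
    intro q _
    rw [pvValB_eq]
  · show (pvStA mt ht (pvCombA (PySem.List.dedup labels) [])).2.items
      = (List.foldl (fun (d : PySem.Dict String Int) q => d.insert (pvEnc q) (pvValB ht q))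
          PySem.Dict.empty (pvCombA (PySem.List.dedup labels) [])).items
    rw [hfin2]
    show (pvCombA (PySem.List.dedup labels) []).map (fun q => (pvEnc q, pvEntry ht q)) = _
    apply List.map_congr_left
    intro q _
    rw [pvValB_eq]
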